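-- pv_equiv track=rewrite | github.com/yakube/NLP-20-21 | Reader/Machine_Reader/__main__.py | max_percent_shared
-- ===== SOURCE A (Python) =====
-- def max_percent_shared(str_list, apa, mode):
--     # 3) The function initially using "zipping" to scan through a word array of the story and create all word arrays
--     # of length x that will later be used for comparison
--     super_list = []
--     for x in range(len(apa)):
--         super_list.append(str_list[x:])
--     zippy = zip(*super_list)
--     max_num = 0
--
--     # 3b) In mode 1, comparisons are based off of SpaCy's identifications of lower-cased token text. A moderate amount
--     # of weight is added to "important" parts of speech which are anything other than determiners and punctuation. While
--     # this is incredibly simplistic, it seemed to help more than it hurt during development trials. Probably because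
--     # words like "the" are not as useful as nouns or verbs.
--     #
--     # A heavier amount of weight was also added to common cases where the question type very clearly matched an answer
--     # type. This ideally helped to cut down guesses that don't even make semantic sense.
--     if mode == 1:
--         for z in zippy:
--             # 3b) Converts tuples into usable arrays of their respective texts, parts of speech, and entity designators
--             z_text = []
--
--             for x in z:
--                 z_text.append(x[0])
--
--             apa_text = []
--             apa_pos = []
--             apa_ent = []
--             for x in apa:
--                 apa_text.append(x[0])
--                 apa_pos.append(x[1])
--                 apa_ent.append(x[2])
--
--             # 3b) Sets an initial weight of 0 and analyzes the attributes of the shared words. This uses POS Tagging,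
--             # Named Entity Recognition, and Question Type Analysis.
--             weight = 0
--             intersect = set(apa_text).intersection(z_text)
--             for x in intersect:
--                 for i in range(len(apa_text)):
--                     if x == apa_text[i]:
--                         # 3b) If a shared word is a non-determiner and a non-punctuation word (such as adjective, verb,
--                         # etc.), it gets a weight of +1 added on. They are deemed to be more important
--                         if apa_pos[i] != 'DET' and apa_pos != 'PUNCT':
--                             weight = weight + 1
--
--                         # 3b) If a shared word is an entity that obviously fits the criteria of the question
--                         # (who -> person, where -> location, etc.), it gets a weight of +2 added on. The weight values
--                         # themselves are pretty much arbitrary, but their purpose is to prioritize certain types of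
--                         # similarity rather than just raw word matching.
--                         if apa_ent[i] is not None:
--                             if apa[0][0] == 'who' and apa_ent[i] == 'PERSON':
--                                 weight = weight + 2
--                             elif apa[0][0] == 'where' and apa_ent[i] == 'LOC':
--                                 weight = weight + 2
--                             elif apa[0][0] == 'where' and apa_ent[i] == 'GPE':
--                                 weight = weight + 2
--                             elif apa[0][0] == 'when' and apa_ent[i] == 'TIME':
--                                 weight = weight + 2
--                             elif apa[0][0] == 'when' and apa_ent[i] == 'DATE':
--                                 weight = weight + 2
--             max_num = max(max_num, len(intersect) + weight)
--
--     else: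
--         # 3a) Mode 0 just returns the maximum word set intersection size along the sliding path. Works exactly as
--         # described in the initial comment up top.
--         for z in zippy:
--             max_num = max(max_num, len(set(apa).intersection(z)))
--
--     return max_num
-- ===== SOURCE B (Python) =====
-- def max_percent_shared(str_list, apa, mode):
--     k = len(apa)
--     n = len(str_list)
--     best = 0
--     if mode == 1:
--         # precompute once: per-word weight table summing each apa position's bonus
--         q = apa[0][0] if apa else None
--         weight = {}
--         for (t, p, e) in apa:
--             inc = 1 if p != 'DET' else 0
--             if e is not None and ((q == 'who' and e == 'PERSON')
--                                   or (q == 'where' and e in ('LOC', 'GPE'))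
--                                   or (q == 'when' and e in ('TIME', 'DATE'))):
--                 inc += 2
--             weight[t] = weight.get(t, 0) + inc
--         for i in range(n - k + 1):
--             score = 0
--             for w in set(tok[0] for tok in str_list[i:i + k]):
--                 if w in weight:
--                     score += 1 + weight[w]
--             best = max(best, score)
--     else:
--         apa_set = set(apa)
--         for i in range(n - k + 1):
--             score = 0
--             for t in set(str_list[i:i + k]):
--                 if t in apa_set:
--                     score += 1
--             best = max(best, score)
--     return best
-- ===== Notes on version B (the rewrite author's own statement) =====
-- stated objective: alternative
-- what changed: B precomputes the apa word-set and a per-word weight table in one pass over apa, then slides direct index windows scoring each by a single scan of the window's distinct words, instead of A's zip-built window tuples with a per-window rebuild of the apa text/pos/ent lists and a nested intersect-times-apa index scan.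
import Mathlib
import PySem

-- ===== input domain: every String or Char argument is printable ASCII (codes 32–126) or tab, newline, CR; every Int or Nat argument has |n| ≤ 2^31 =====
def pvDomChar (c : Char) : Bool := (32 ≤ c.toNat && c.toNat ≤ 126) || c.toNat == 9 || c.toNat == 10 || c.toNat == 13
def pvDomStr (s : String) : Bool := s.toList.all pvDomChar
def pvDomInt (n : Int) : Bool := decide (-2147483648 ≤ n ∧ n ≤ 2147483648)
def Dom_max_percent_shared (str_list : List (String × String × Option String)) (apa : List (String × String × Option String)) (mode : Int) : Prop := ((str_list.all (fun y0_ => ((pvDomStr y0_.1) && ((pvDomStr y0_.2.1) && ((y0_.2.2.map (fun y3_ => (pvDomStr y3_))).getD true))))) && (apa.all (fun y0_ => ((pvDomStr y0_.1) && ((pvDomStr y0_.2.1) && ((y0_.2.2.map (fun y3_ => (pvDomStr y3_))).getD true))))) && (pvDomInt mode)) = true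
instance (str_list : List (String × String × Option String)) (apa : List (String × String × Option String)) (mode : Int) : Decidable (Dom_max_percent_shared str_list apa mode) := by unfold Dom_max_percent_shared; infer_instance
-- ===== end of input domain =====

-- B is an exact re-implementation: it precomputes the apa word-weight table once and slides
-- direct index windows, replacing A's per-window zip/rebuild and nested intersect×apa scan.

-- ===== PORT A =====

-- heads of a list of lists: none as soon as one list is empty (Python zip stops there)
def pvHeads? {α : Type} : List (List α) → Option (List α)
  | [] => some []
  | [] :: _ => none
  | (a :: _) :: rest => (pvHeads? rest).map (a :: ·)

-- zip(*lists): repeatedly take all heads until some list is exhausted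
def pvZip {α : Type} : List (List α) → List (List α)
  | [] => []
  | [] :: _ => []
  | (a :: t) :: rest =>
    match pvHeads? rest with
    | none => []
    | some hs => (a :: hs) :: pvZip (t :: rest.map List.tail)
termination_by ls => (match ls with | l :: _ => l.length | [] => 0)
decreasing_by simp

-- per-window score for mode 1 (the body of A's 'for z in zippy' loop)
def pvScoreA1 (apa : List (String × String × Option String)) (z : List (String × String × Option String)) : Int :=
  let z_text := z.foldl (fun acc x => acc ++ [x.1]) []
  let apa_text := apa.foldl (fun acc x => acc ++ [x.1]) []
  let apa_pos := apa.foldl (fun acc x => acc ++ [x.2.1]) []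
  let apa_ent := apa.foldl (fun acc x => acc ++ [x.2.2]) []
  let intersect := PySem.Set.inter (PySem.Set.ofList apa_text) z_text
  let weight : Int := intersect.foldl (fun weight x =>
    (List.range apa_text.length).foldl (fun weight i =>
      if x == apa_text.getD i "" then
        -- A's 'and apa_pos != "PUNCT"' compares the LIST apa_pos with a string: always True; kept
        let weight := if apa_pos.getD i "" != "DET" then weight + 1 else weight
        if (apa_ent.getD i none).isSome then
          let q := (PySem.List.pyGetD apa 0 ("", "", none)).1   -- apa[0][0]; only reached when apa ≠ []
          if q == "who" && apa_ent.getD i none == some "PERSON" then weight + 2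
          else if q == "where" && apa_ent.getD i none == some "LOC" then weight + 2
          else if q == "where" && apa_ent.getD i none == some "GPE" then weight + 2
          else if q == "when" && apa_ent.getD i none == some "TIME" then weight + 2
          else if q == "when" && apa_ent.getD i none == some "DATE" then weight + 2
          else weight
        else weight
      else weight) weight) 0
  (intersect.length : Int) + weight

-- per-window score for the else branch (mode ≠ 1)
def pvScoreA0 (apa : List (String × String × Option String)) (z : List (String × String × Option String)) : Int :=
  ((PySem.Set.inter (PySem.Set.ofList apa) z).length : Int)

def max_percent_shared (str_list : List (String × String × Option String)) (apa : List (String × String × Option String)) (mode : Int) : Int :=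
  let super_list := (List.range apa.length).foldl
    (fun acc (x : Nat) => acc ++ [PySem.List.slice str_list (some (x : Int)) none]) []
  let zippy := pvZip super_list
  let max_num : Int := 0
  if mode == 1 then
    zippy.foldl (fun max_num z => max max_num (pvScoreA1 apa z)) max_num
  else
    zippy.foldl (fun max_num z => max max_num (pvScoreA0 apa z)) max_num

-- ===== PORT B =====

-- one pass over apa: word -> summed bonus weight (entity bonus keyed on apa[0][0])
def pvWeightTable (apa : List (String × String × Option String)) : PySem.Dict String Int :=
  let q : Option String := match apa with | [] => none | x :: _ => some x.1
  apa.foldl (fun d x =>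
    let inc : Int := if x.2.1 != "DET" then 1 else 0
    let inc := if x.2.2.isSome &&
        ((q == some "who" && x.2.2 == some "PERSON") ||
         (q == some "where" && (x.2.2 == some "LOC" || x.2.2 == some "GPE")) ||
         (q == some "when" && (x.2.2 == some "TIME" || x.2.2 == some "DATE")))
      then inc + 2 else inc
    d.insert x.1 (d.getD x.1 0 + inc)) PySem.Dict.empty

-- window score, mode 1: each distinct apa word in the window contributes 1 + its weight
def pvScoreB1 (wt : PySem.Dict String Int) (window : List (String × String × Option String)) : Int :=
  (PySem.Set.ofList (window.map (·.1))).foldl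
    (fun score w => if (wt.get? w).isSome then score + 1 + wt.getD w 0 else score) 0

-- window score, mode ≠ 1: count distinct window tokens that occur in apa
def pvScoreB0 (apa_set : PySem.Set (String × String × Option String)) (window : List (String × String × Option String)) : Int :=
  (PySem.Set.ofList window).foldl
    (fun score t => if PySem.Set.contains apa_set t then score + 1 else score) 0

def max_percent_shared_alt (str_list : List (String × String × Option String)) (apa : List (String × String × Option String)) (mode : Int) : Int :=
  let k := apa.length
  let n := str_list.length
  let best : Int := 0
  if mode == 1 then
    let wt := pvWeightTable apa
    (List.range (n + 1 - k)).foldl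
      (fun best i => max best (pvScoreB1 wt ((str_list.drop i).take k))) best
  else
    let apa_set := PySem.Set.ofList apa
    (List.range (n + 1 - k)).foldl
      (fun best i => max best (pvScoreB0 apa_set ((str_list.drop i).take k))) best

-- ===== PRECONDITION & SPEC =====
def Spec_max_percent_shared (str_list : List (String × String × Option String)) (apa : List (String × String × Option String)) (mode : Int) (out : Int) : Prop := out = max_percent_shared_alt str_list apa mode
instance (str_list : List (String × String × Option String)) (apa : List (String × String × Option String)) (mode : Int) (out : Int) : Decidable (Spec_max_percent_shared str_list apa mode out) := by unfold Spec_max_percent_shared; infer_instance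

-- ===== CLAIM (what is proved, stated in full; the proofs are below) =====
def Claim_equal_max_percent_shared : Prop := ∀ (str_list : List (String × String × Option String)) (apa : List (String × String × Option String)) (mode : Int), Dom_max_percent_shared str_list apa mode → Spec_max_percent_shared str_list apa mode (max_percent_shared str_list apa mode)

-- ===== LEMMAS AND PROOFS =====


-- proof-only helpers: the canonical per-apa-entry bonus and per-word weight sum
def pvInc (q : Option String) (x : String × String × Option String) : Int :=
  let inc : Int := if x.2.1 != "DET" then 1 else 0
  if x.2.2.isSome &&
      ((q == some "who" && x.2.2 == some "PERSON") ||
       (q == some "where" && (x.2.2 == some "LOC" || x.2.2 == some "GPE")) ||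
       (q == some "when" && (x.2.2 == some "TIME" || x.2.2 == some "DATE")))
    then inc + 2 else inc

def pvQ (apa : List (String × String × Option String)) : Option String :=
  match apa with | [] => none | x :: _ => some x.1

def pvF (q : Option String) (x : String) (v : String × String × Option String) : Int :=
  if x = v.1 then pvInc q v else 0

def pvS (apa : List (String × String × Option String)) (x : String) : Int :=
  (apa.map (fun v => pvF (pvQ apa) x v)).sum

theorem sum_map_ite_zero {a : Type} (p : a → Prop) [DecidablePred p] (f : a → Int) (l : List a) :
    (l.map (fun w => if p w then f w else 0)).sum = ((l.filter (fun w => decide (p w))).map f).sum := by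
  induction l with
  | nil => rfl
  | cons x l ih => by_cases h : p x <;> simp [h, ih]

theorem sum_range_getD {a : Type} (l : List a) (d : a) (F : a → Int) :
    ((List.range l.length).map (fun i => F (l.getD i d))).sum = (l.map F).sum := by
  induction l with
  | nil => simp
  | cons x l ih =>
    rw [List.length_cons, List.range_succ_eq_map]
    simp only [List.map_cons, List.map_map, Function.comp_def, List.getD_cons_succ,
      List.getD_cons_zero, List.sum_cons, ih]

theorem getD_map_lt {a b : Type} (f : a → b) (l : List a) {i : Nat} (h : i < l.length)
    (d : b) (d' : a) : (l.map f).getD i d = f (l.getD i d') := by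
  simp [List.getD_eq_getElem?_getD, h]

theorem table_getD (l : List (String × String × Option String)) (q : Option String) (x : String) :
    ∀ d : PySem.Dict String Int,
      (l.foldl (fun d v => d.insert v.1 (d.getD v.1 0 + pvInc q v)) d).getD x 0
        = d.getD x 0 + (l.map (fun v => pvF q x v)).sum := by
  induction l with
  | nil => simp
  | cons v l ih =>
    intro d
    simp only [List.foldl_cons, List.map_cons, List.sum_cons]
    rw [ih, PySem.Dict.getD_insert]
    simp only [pvF]
    split_ifs with h
    · rw [h]; ring
    · ring

theorem wt_eq (apa : List (String × String × Option String)) :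
    pvWeightTable apa
      = apa.foldl (fun d v => d.insert v.1 (d.getD v.1 0 + pvInc (pvQ apa) v)) PySem.Dict.empty := rfl

theorem wt_getD (apa : List (String × String × Option String)) (x : String) :
    (pvWeightTable apa).getD x 0 = pvS apa x := by
  rw [wt_eq, table_getD]
  simp [pvS, PySem.Dict.getD_empty]

theorem wt_isSome (apa : List (String × String × Option String)) (x : String) :
    ((pvWeightTable apa).get? x).isSome = true ↔ x ∈ apa.map (fun v => v.1) := by
  rw [← PySem.Dict.contains_eq_isSome_get?, PySem.Dict.contains_iff_mem_keys, wt_eq,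
    PySem.Dict.keys_foldl_insert_key, PySem.Dict.keys_empty, PySem.Set.update_nil_left,
    PySem.Set.mem_ofList]

theorem chain_eq (qs x : String) (v : String × String × Option String) (w : Int) :
    (if x == v.1 then
       (if v.2.2.isSome then
          (if qs == "who" && v.2.2 == some "PERSON" then (if v.2.1 != "DET" then w + 1 else w) + 2
           else if qs == "where" && v.2.2 == some "LOC" then (if v.2.1 != "DET" then w + 1 else w) + 2
           else if qs == "where" && v.2.2 == some "GPE" then (if v.2.1 != "DET" then w + 1 else w) + 2
           else if qs == "when" && v.2.2 == some "TIME" then (if v.2.1 != "DET" then w + 1 else w) + 2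
           else if qs == "when" && v.2.2 == some "DATE" then (if v.2.1 != "DET" then w + 1 else w) + 2
           else (if v.2.1 != "DET" then w + 1 else w))
        else (if v.2.1 != "DET" then w + 1 else w))
     else w)
    = w + pvF (some qs) x v := by
  obtain ⟨t, p, e⟩ := v
  simp only [pvF, pvInc]
  cases e <;> split_ifs <;> simp_all <;> first | omega | tauto

theorem foldl_max_zero (l : List Nat) :
    List.foldl (fun (b : Int) (_ : Nat) => max b 0) 0 l = 0 := by
  induction l with
  | nil => rfl
  | cons x l ih => simpa using ih

-- heads of successive drops of xs are take k xs (when they all exist)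
theorem pvHeads?_drops {α : Type} (k : Nat) (xs : List α) :
    pvHeads? ((List.range k).map (fun j => xs.drop j)) =
      if k ≤ xs.length then some (xs.take k) else none := by
  induction k generalizing xs with
  | zero => simp [pvHeads?]
  | succ k ih =>
    rw [List.range_succ_eq_map]
    cases xs with
    | nil => simp [pvHeads?]
    | cons a xs' =>
      simp only [List.map_cons, List.map_map, List.drop_zero, Function.comp_def,
        List.drop_succ_cons]
      rw [pvHeads?, ih]
      by_cases h : k ≤ xs'.length <;> simp [h]

-- the zip of the k shifted copies of xs lists exactly the k-windows of xs (k ≥ 1)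
theorem pvZip_windows {α : Type} (k : Nat) (hk : 1 ≤ k) (xs : List α) :
    pvZip ((List.range k).map (fun j => xs.drop j)) =
      (List.range (xs.length + 1 - k)).map (fun i => (xs.drop i).take k) := by
  obtain ⟨k', rfl⟩ : ∃ k', k = k' + 1 := ⟨k - 1, by omega⟩
  induction xs with
  | nil =>
    rw [List.range_succ_eq_map]
    simp [pvZip]
  | cons x xs ih =>
    rw [List.range_succ_eq_map]
    simp only [List.map_cons, List.map_map, List.drop_zero, Function.comp_def,
      List.drop_succ_cons]
    rw [pvZip, pvHeads?_drops]
    by_cases h : k' ≤ xs.length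
    · rw [if_pos h]
      simp only [List.map_map, Function.comp_def, List.tail_drop]
      have h2 : xs :: (List.range k').map (fun j => xs.drop (j + 1))
          = (List.range (k' + 1)).map (fun j => xs.drop j) := by
        rw [List.range_succ_eq_map]; simp
      rw [h2, ih]
      have h3 : xs.length + 1 - (k' + 1) = xs.length - k' := by omega
      have h4 : (x :: xs).length + 1 - (k' + 1) = (xs.length - k') + 1 := by
        simp; omega
      rw [h3, h4, List.range_succ_eq_map]
      simp [List.take_succ_cons]
    · rw [if_neg h]
      have h4 : (x :: xs).length + 1 - (k' + 1) = 0 := by simp; omega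
      rw [h4]
      simp

-- per-window equality, mode 1
theorem score1_eq (apa z : List (String × String × Option String)) :
    pvScoreA1 apa z = pvScoreB1 (pvWeightTable apa) z := by
  -- B side: fold = sum of (1 + weight) over distinct window words present in apa
  have hBbody : (fun (score : Int) (w : String) =>
        if ((pvWeightTable apa).get? w).isSome then score + 1 + (pvWeightTable apa).getD w 0
        else score)
      = fun score w => score + (if w ∈ apa.map (fun v => v.1) then 1 + pvS apa w else 0) := by
    funext s w
    by_cases h : w ∈ apa.map (fun v => v.1)
    · rw [if_pos ((wt_isSome apa w).mpr h), if_pos h, wt_getD]; ring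
    · have h2 : ((pvWeightTable apa).get? w).isSome = false := by
        rw [Bool.eq_false_iff]; intro hc; exact h ((wt_isSome apa w).mp hc)
      rw [h2]; simp [h]
  simp only [pvScoreB1]
  rw [hBbody, PySem.List.foldl_add, zero_add, sum_map_ite_zero]
  -- A side: the intersect loop sums the same per-word contributions
  simp only [pvScoreA1, PySem.List.foldl_append_singleton_eq_map, List.nil_append]
  have hAbody : (∀ (w : Int) (x : String),
      (List.range (List.map (fun v => v.1) apa).length).foldl (fun weight i =>
        if x == (List.map (fun v => v.1) apa).getD i "" then
          if ((List.map (fun v => v.2.2) apa).getD i none).isSome then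
            if (PySem.List.pyGetD apa 0 ("", "", none)).1 == "who" &&
                (List.map (fun v => v.2.2) apa).getD i none == some "PERSON" then
              (if (List.map (fun v => v.2.1) apa).getD i "" != "DET" then weight + 1 else weight) + 2
            else if (PySem.List.pyGetD apa 0 ("", "", none)).1 == "where" &&
                (List.map (fun v => v.2.2) apa).getD i none == some "LOC" then
              (if (List.map (fun v => v.2.1) apa).getD i "" != "DET" then weight + 1 else weight) + 2
            else if (PySem.List.pyGetD apa 0 ("", "", none)).1 == "where" &&
                (List.map (fun v => v.2.2) apa).getD i none == some "GPE" then
              (if (List.map (fun v => v.2.1) apa).getD i "" != "DET" then weight + 1 else weight) + 2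
            else if (PySem.List.pyGetD apa 0 ("", "", none)).1 == "when" &&
                (List.map (fun v => v.2.2) apa).getD i none == some "TIME" then
              (if (List.map (fun v => v.2.1) apa).getD i "" != "DET" then weight + 1 else weight) + 2
            else if (PySem.List.pyGetD apa 0 ("", "", none)).1 == "when" &&
                (List.map (fun v => v.2.2) apa).getD i none == some "DATE" then
              (if (List.map (fun v => v.2.1) apa).getD i "" != "DET" then weight + 1 else weight) + 2
            else (if (List.map (fun v => v.2.1) apa).getD i "" != "DET" then weight + 1 else weight)
          else (if (List.map (fun v => v.2.1) apa).getD i "" != "DET" then weight + 1 else weight)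
        else weight) w = w + pvS apa x) := by
    intro w x
    rw [PySem.List.foldl_congr_mem _ _
      (fun (w : Int) (i : Nat) => w + pvF (pvQ apa) x (apa.getD i ("", "", none))) w ?_]
    · rw [PySem.List.foldl_add, List.length_map, sum_range_getD]
      simp [pvS]
    · intro acc i hi
      rw [List.mem_range, List.length_map] at hi
      rw [getD_map_lt _ _ hi _ ("", "", none), getD_map_lt _ _ hi _ ("", "", none),
        getD_map_lt _ _ hi _ ("", "", none)]
      cases apa with
      | nil => simp at hi
      | cons a rest =>
        rw [PySem.List.pyGetD_zero_cons]
        exact chain_eq a.1 x _ acc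
  simp only [hAbody]
  rw [PySem.List.foldl_add, zero_add]
  have hperm : (PySem.Set.inter (PySem.Set.ofList (apa.map (fun v => v.1)))
        (z.map (fun v => v.1))).Perm
      ((PySem.Set.ofList (z.map (fun v => v.1))).filter
        (fun w => decide (w ∈ apa.map (fun v => v.1)))) := by
    rw [List.perm_ext_iff_of_nodup (PySem.Set.nodup_inter _ _ (PySem.Set.nodup_ofList _))
      ((PySem.Set.nodup_ofList _).filter _)]
    intro a
    simp [PySem.Set.mem_inter, List.mem_filter, PySem.Set.mem_ofList, and_comm]
  rw [← (hperm.map (fun w => 1 + pvS apa w)).sum_eq,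
    PySem.List.sum_map_add_int, PySem.List.sum_map_const_int]
  ring

-- per-window equality, mode ≠ 1
theorem score0_eq (apa z : List (String × String × Option String)) :
    pvScoreA0 apa z = pvScoreB0 (PySem.Set.ofList apa) z := by
  simp only [pvScoreA0, pvScoreB0]
  have hbody : (fun (score : Int) (t : String × String × Option String) =>
        if PySem.Set.contains (PySem.Set.ofList apa) t then score + 1 else score)
      = fun score t => score + (if PySem.Set.contains (PySem.Set.ofList apa) t then 1 else 0) := by
    funext s t; split_ifs <;> omega
  rw [hbody, PySem.List.foldl_add, PySem.List.sum_map_ite_one_zero, zero_add,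
    List.countP_eq_length_filter]
  have hperm : (PySem.Set.inter (PySem.Set.ofList apa) z).Perm
      ((PySem.Set.ofList z).filter (fun t => PySem.Set.contains (PySem.Set.ofList apa) t)) := by
    rw [List.perm_ext_iff_of_nodup (PySem.Set.nodup_inter _ _ (PySem.Set.nodup_ofList _))
      ((PySem.Set.nodup_ofList _).filter _)]
    intro a
    simp [PySem.Set.mem_inter, List.mem_filter, PySem.Set.mem_ofList, and_comm]
  rw [hperm.length_eq]

-- ===== VERDICT (by name: the statement is the Claim_ definition above) =====
theorem max_percent_shared_spec : Claim_equal_max_percent_shared := by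
  intro str_list apa mode _
  unfold Spec_max_percent_shared
  simp only [max_percent_shared, max_percent_shared_alt,
    PySem.List.foldl_append_singleton_eq_map, List.nil_append]
  have hsup : ∀ k : Nat, (List.range k).map
        (fun (x : Nat) => PySem.List.slice str_list (some (x : Int)) none)
      = (List.range k).map (fun j => str_list.drop j) :=
    fun k => List.map_congr_left fun j _ => PySem.List.slice_from_natCast str_list j
  rw [hsup]
  cases apa with
  | nil =>
    simp only [List.length_nil, List.range_zero, List.map_nil, Nat.sub_zero, List.take_zero]
    have h1 : pvScoreB1 (pvWeightTable []) [] = 0 := rfl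
    have h0 : pvScoreB0 ([] : PySem.Set (String × String × Option String)) [] = 0 := rfl
    split <;> simp [pvZip, h1, h0, foldl_max_zero]
  | cons a rest =>
    rw [pvZip_windows _ (by simp)]
    simp only [List.foldl_map]
    split
    · refine PySem.List.foldl_congr_mem _ _ _ _ ?_
      intro m i _; rw [score1_eq]
    · refine PySem.List.foldl_congr_mem _ _ _ _ ?_
      intro m i _; rw [score0_eq]
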